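-- pv_equiv track=rewrite | github.com/prajithravisankar/DSA | old/launchpad_50_easy_questions/hamming_distance.py | convert_to_bits_in_list
-- ===== SOURCE A (Python) =====
-- def convert_to_bits_in_list(x, y):
--     remaining_x = x
--     remaining_y = y
--     bit_x = []
--     bit_y = []
--     while remaining_x > 0:
--         reminder_x = remaining_x % 2
--         bit_x.append(reminder_x)
--         remaining_x = remaining_x // 2
--
--     while remaining_y > 0:
--         reminder_y = remaining_y % 2
--         bit_y.append(reminder_y)
--         remaining_y = remaining_y // 2
--
--     max_len = max(len(bit_x), len(bit_y))
--
--     while len(bit_x) < max_len: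
--         bit_x.append(0)
--
--     while len(bit_y) < max_len:
--         bit_y.append(0)
--
--     bit_x.reverse()
--     bit_y.reverse()
--
--     return bit_x, bit_y
-- ===== SOURCE B (Python) =====
-- def convert_to_bits_in_list(x, y):
--     bx = [int(c) for c in bin(x)[2:]] if x > 0 else []
--     by = [int(c) for c in bin(y)[2:]] if y > 0 else []
--     n = max(len(bx), len(by))
--     return [0] * (n - len(bx)) + bx, [0] * (n - len(by)) + by
-- ===== Notes on version B (the rewrite author's own statement) =====
-- stated objective: idiomatic
-- what changed: B obtains MSB-first bits directly from bin(x) string formatting and left-pads with [0]*k, replacing A's LSB-append modulo/division loops, padding-append loops and final reverses.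
import Mathlib
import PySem

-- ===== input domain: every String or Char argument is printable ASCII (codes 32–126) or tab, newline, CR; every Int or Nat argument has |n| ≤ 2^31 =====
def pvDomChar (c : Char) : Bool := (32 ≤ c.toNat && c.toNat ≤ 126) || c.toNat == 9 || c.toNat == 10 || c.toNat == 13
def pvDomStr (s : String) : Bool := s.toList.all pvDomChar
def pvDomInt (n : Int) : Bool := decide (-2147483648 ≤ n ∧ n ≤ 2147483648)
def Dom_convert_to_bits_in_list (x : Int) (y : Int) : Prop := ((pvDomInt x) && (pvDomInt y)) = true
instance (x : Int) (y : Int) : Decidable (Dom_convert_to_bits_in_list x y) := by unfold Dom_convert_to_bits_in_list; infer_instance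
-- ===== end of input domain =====

-- B builds MSB-first bit digits directly (bin(x)[2:]) and left-pads with zeros,
-- instead of A's LSB-append modulo/division loops, append-padding loops and final reverses. (objective: idiomatic)

-- ===== PORT A =====
-- the `while remaining > 0: append(remaining % 2); remaining //= 2` loop (list built LSB-first)
def pvLsbBits (x : Int) : List Int :=
  if 0 < x then PySem.Int.mod x 2 :: pvLsbBits (PySem.Int.floordiv x 2) else []
termination_by x.toNat
decreasing_by
  rw [PySem.Int.floordiv_eq_ediv_of_pos (by norm_num : (0:Int) < 2)]
  omega

-- the `while len(l) < n: l.append(0)` padding loop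
def pvPadTo (l : List Int) (n : Nat) : List Int :=
  if l.length < n then pvPadTo (l ++ [0]) n else l
termination_by n - l.length
decreasing_by simp; omega

def convert_to_bits_in_list (x : Int) (y : Int) : List Int × List Int :=
  let bit_x := pvLsbBits x
  let bit_y := pvLsbBits y
  let max_len := max bit_x.length bit_y.length
  ((pvPadTo bit_x max_len).reverse, (pvPadTo bit_y max_len).reverse)

-- ===== PORT B =====
-- MSB-first binary digits of x: port of `[int(c) for c in bin(x)[2:]] if x > 0 else []`
-- (exact: for x > 0 bin(x)[2:] is exactly these digits, MSB first; the x > 0 guard is Source B's)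
def pvMsbBits (x : Int) : List Int :=
  if 0 < x then pvMsbBits (PySem.Int.floordiv x 2) ++ [PySem.Int.mod x 2] else []
termination_by x.toNat
decreasing_by
  rw [PySem.Int.floordiv_eq_ediv_of_pos (by norm_num : (0:Int) < 2)]
  omega

def convert_to_bits_in_list_alt (x : Int) (y : Int) : List Int × List Int :=
  let bx := pvMsbBits x
  let by' := pvMsbBits y
  let n := max bx.length by'.length
  (List.replicate (n - bx.length) 0 ++ bx, List.replicate (n - by'.length) 0 ++ by')

-- ===== PRECONDITION & SPEC =====
def Spec_convert_to_bits_in_list (x : Int) (y : Int) (out : List Int × List Int) : Prop := out = convert_to_bits_in_list_alt x y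
instance (x : Int) (y : Int) (out : List Int × List Int) : Decidable (Spec_convert_to_bits_in_list x y out) := by unfold Spec_convert_to_bits_in_list; infer_instance

-- ===== CLAIM (what is proved, stated in full; the proofs are below) =====
def Claim_equal_convert_to_bits_in_list : Prop := ∀ (x : Int) (y : Int), Dom_convert_to_bits_in_list x y → Spec_convert_to_bits_in_list x y (convert_to_bits_in_list x y)

-- ===== LEMMAS AND PROOFS =====
theorem pvMsbBits_eq_reverse (x : Int) : pvMsbBits x = (pvLsbBits x).reverse := by
  induction x using pvLsbBits.induct with
  | case1 x h ih =>
    rw [pvMsbBits, pvLsbBits, if_pos h, if_pos h, ih]; simp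
  | case2 x h => rw [pvMsbBits, pvLsbBits, if_neg h, if_neg h]; simp

theorem pvPadTo_eq_aux (k : Nat) : ∀ (l : List Int) (n : Nat), n - l.length = k →
    pvPadTo l n = l ++ List.replicate k 0 := by
  induction k with
  | zero =>
    intro l n hk
    rw [pvPadTo, if_neg (by omega)]
    simp
  | succ k ih =>
    intro l n hk
    rw [pvPadTo, if_pos (by omega), ih (l ++ [0]) n (by simp; omega)]
    simp [List.replicate_succ]

theorem pvPadTo_eq (l : List Int) (n : Nat) :
    pvPadTo l n = l ++ List.replicate (n - l.length) 0 :=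
  pvPadTo_eq_aux (n - l.length) l n rfl

theorem pvLsbBits_reverse (x : Int) : (pvLsbBits x).reverse = pvMsbBits x := by
  rw [pvMsbBits_eq_reverse]

theorem pvLen_eq (x : Int) : (pvLsbBits x).length = (pvMsbBits x).length := by
  rw [pvMsbBits_eq_reverse, List.length_reverse]

-- ===== VERDICT (by name: the statement is the Claim_ definition above) =====
theorem convert_to_bits_in_list_spec : Claim_equal_convert_to_bits_in_list := by
  intro x y _
  unfold Spec_convert_to_bits_in_list convert_to_bits_in_list convert_to_bits_in_list_alt
  simp only [pvPadTo_eq, List.reverse_append, List.reverse_replicate, pvLsbBits_reverse,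
    pvLen_eq]
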